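-- pv_equiv track=rewrite | github.com/KuangshiAi/magentic-ui | src/magentic_ui/agents/coder/Utility/extract_utils.py | extract_error_messages
-- ===== SOURCE A (Python) =====
-- def extract_error_messages(stderr_output):
--     """
--     Extracts error messages from stderr output.
--     """
--     # Split the stderr output into lines
--     lines = stderr_output.split('\n')
--
--     # Initialize a list to store error messages
--     error_messages = []
--
--     # Extract lines that contain error messages
--     for i, line in enumerate(lines):
--         if 'Traceback (most recent call last):' in line:
--             # Start of a new traceback, find the next line starting with 'File'
--             for j in range(i+1, len(lines)):
--                 if lines[j].strip().startswith('File'):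
--                     # Add lines until 'AttributeError' or other errors are encountered
--                     error_detail = lines[j].strip()
--                     k = j + 1
--                     while k < len(lines) and not lines[k].strip().startswith('File'):
--                         error_detail += '\n' + lines[k].strip()
--                         k += 1
--                     error_messages.append(error_detail)
--                     break
--
--     return error_messages
-- ===== SOURCE B (Python) =====
-- def extract_error_messages(stderr_output):
--     """
--     Extracts error messages from stderr output.
--
--     Single backward pass: walk the lines from the end, maintaining the detail
--     block of the nearest following 'File' line, instead of rescanning forward
--     for every traceback marker.
--     """
--     out = []
--     pend = None          # detail block of the first 'File' line after the current position
--     buf = []             # stripped lines after the current position, before that 'File' line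
--     for line in reversed(stderr_output.split('\n')):
--         if 'Traceback (most recent call last):' in line and pend is not None:
--             out.append(pend)
--         s = line.strip()
--         if s.startswith('File'):
--             pend = '\n'.join([s] + buf)
--             buf = []
--         else:
--             buf = [s] + buf
--     out.reverse()
--     return out
-- ===== Notes on version B (the rewrite author's own statement) =====
-- stated objective: alternative
-- what changed: Replaces A's per-traceback forward rescan (nested loops restarting at i+1) with a single backward pass that carries the detail block of the nearest following file-header line as state.
import Mathlib
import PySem

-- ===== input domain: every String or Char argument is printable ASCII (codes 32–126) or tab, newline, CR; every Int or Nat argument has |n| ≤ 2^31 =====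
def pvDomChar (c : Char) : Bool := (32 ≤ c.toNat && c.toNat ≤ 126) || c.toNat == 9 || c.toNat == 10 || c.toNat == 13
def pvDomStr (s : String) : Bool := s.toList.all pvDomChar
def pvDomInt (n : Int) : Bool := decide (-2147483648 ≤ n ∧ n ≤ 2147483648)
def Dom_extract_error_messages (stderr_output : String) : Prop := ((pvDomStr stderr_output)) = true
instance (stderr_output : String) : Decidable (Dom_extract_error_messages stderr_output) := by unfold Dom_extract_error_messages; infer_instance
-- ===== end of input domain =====

-- B replaces A's per-traceback forward rescans with a single backward pass carrying the
-- nearest following file-header detail block as state (objective: alternative decomposition).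


-- ===== PORT A =====
-- shared micro-helpers (the very same Python expressions appear in both programs)
def pvIsFile (l : String) : Bool := PySem.Str.startswith (PySem.Str.strip l) "File"
def pvHasTb (l : String) : Bool := PySem.Str.isIn "Traceback (most recent call last):" l

-- the k-while-loop: error_detail += '\n' + lines[k].strip() until a 'File' line or EOF
def pvDetailA (acc : String) : List String → String
  | [] => acc
  | l :: t => if pvIsFile l then acc else pvDetailA (acc ++ "\n" ++ PySem.Str.strip l) t

-- the j-loop: scan forward from i+1 for the first 'File' line; 0 or 1 appended detail
def pvFindFileA : List String → List String
  | [] => []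
  | l :: t => if pvIsFile l then [pvDetailA (PySem.Str.strip l) t] else pvFindFileA t

-- the outer enumerate loop (only the suffix after position i is ever read)
def pvOuterA : List String → List String
  | [] => []
  | l :: t => (if pvHasTb l then pvFindFileA t else []) ++ pvOuterA t

def extract_error_messages (stderr_output : String) : List String :=
  pvOuterA ((PySem.Str.split? stderr_output "\n").getD [])   -- sep = "\n" ≠ "", so split? is some

-- ===== PORT B =====
-- one backward step over the lines; state = (out, pend, buf) as in Source B
def pvStepB (line : String) (st : List String × Option String × List String) :
    List String × Option String × List String :=
  let out := if pvHasTb line then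
               (match st.2.1 with | some b => b :: st.1 | none => st.1)
             else st.1
  let s := PySem.Str.strip line
  if PySem.Str.startswith s "File" then
    (out, some (PySem.Str.join "\n" (s :: st.2.2)), [])
  else
    (out, st.2.1, s :: st.2.2)

def extract_error_messages_alt (stderr_output : String) : List String :=
  (((PySem.Str.split? stderr_output "\n").getD []).foldr pvStepB ([], none, [])).1

-- ===== PRECONDITION & SPEC =====
def Spec_extract_error_messages (stderr_output : String) (out : List String) : Prop := out = extract_error_messages_alt stderr_output
instance (stderr_output : String) (out : List String) : Decidable (Spec_extract_error_messages stderr_output out) := by unfold Spec_extract_error_messages; infer_instance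

-- ===== CLAIM (what is proved, stated in full; the proofs are below) =====
def Claim_equal_extract_error_messages : Prop := ∀ (stderr_output : String), Dom_extract_error_messages stderr_output → Spec_extract_error_messages stderr_output (extract_error_messages stderr_output)

-- ===== LEMMAS AND PROOFS =====

lemma pvJoinSingleton (a : String) : PySem.Str.join "\n" [a] = a := by
  apply String.toList_inj.mp
  simp [PySem.Str.toList_join, PySem.Chars.join_singleton]

lemma pvCharsJoin2 (sep p q : List Char) (r : List (List Char)) :
    PySem.Chars.join sep ((p ++ sep ++ q) :: r) = PySem.Chars.join sep (p :: q :: r) := by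
  cases r with
  | nil => simp [PySem.Chars.join_cons_cons, PySem.Chars.join_singleton]
  | cons x xs => simp [PySem.Chars.join_cons_cons, List.append_assoc]

lemma pvStrJoin2 (a b : String) (r : List String) :
    PySem.Str.join "\n" ((a ++ "\n" ++ b) :: r) = PySem.Str.join "\n" (a :: b :: r) := by
  apply String.toList_inj.mp
  have h := pvCharsJoin2 "\n".toList a.toList b.toList (r.map String.toList)
  simpa [PySem.Str.toList_join] using h

-- A's k-loop is '\n'.join of the stripped lines up to the next 'File' line
lemma pvDetailA_eq_join (t : List String) (acc : String) :
    pvDetailA acc t =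
      PySem.Str.join "\n" (acc :: (t.takeWhile (fun l => !pvIsFile l)).map PySem.Str.strip) := by
  induction t generalizing acc with
  | nil => simp [pvDetailA, pvJoinSingleton]
  | cons l t ih =>
    by_cases h : pvIsFile l
    · simp [pvDetailA, h, pvJoinSingleton]
    · have h1 : pvDetailA acc (l :: t) = pvDetailA (acc ++ "\n" ++ PySem.Str.strip l) t := by
        simp [pvDetailA, h]
      have h2 : List.takeWhile (fun l => !pvIsFile l) (l :: t) =
          l :: List.takeWhile (fun l => !pvIsFile l) t := by
        simp [h]
      rw [h1, ih, h2, List.map_cons, ← pvStrJoin2]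

-- A's j-loop returns at most one element; consuming its head? is appending it
lemma pvFindFileA_head_append (t : List String) (ys : List String) :
    (match (pvFindFileA t).head? with | some b => b :: ys | none => ys) =
      pvFindFileA t ++ ys := by
  induction t with
  | nil => rfl
  | cons l t ih =>
    by_cases h : pvIsFile l
    · simp [pvFindFileA, h]
    · simpa [pvFindFileA, h] using ih

-- the backward fold computes A's outer result plus the pending block and buffer
lemma pvFoldrB_spec (xs : List String) :
    xs.foldr pvStepB ([], none, []) =
      (pvOuterA xs, (pvFindFileA xs).head?,
       (xs.takeWhile (fun l => !pvIsFile l)).map PySem.Str.strip) := by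
  induction xs with
  | nil => rfl
  | cons l t ih =>
    rw [List.foldr_cons, ih]
    show pvStepB l _ = _
    simp only [pvStepB]
    have hfile : PySem.Str.startswith (PySem.Str.strip l) "File" = pvIsFile l := rfl
    rw [hfile]
    by_cases hf : pvIsFile l
    · by_cases ht : pvHasTb l <;>
        simp [hf, ht, pvOuterA, pvFindFileA,
          pvDetailA_eq_join, pvFindFileA_head_append]
    · by_cases ht : pvHasTb l <;>
        simp [hf, ht, pvOuterA, pvFindFileA,
          pvFindFileA_head_append]

-- ===== VERDICT (by name: the statement is the Claim_ definition above) =====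
theorem extract_error_messages_spec : Claim_equal_extract_error_messages := by
  intro s _
  unfold Spec_extract_error_messages extract_error_messages extract_error_messages_alt
  rw [pvFoldrB_spec]
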